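-- pv_equiv track=rewrite | github.com/KyleKurumin/leetcode-practice | lc0029.py | quick_mul
-- ===== SOURCE A (Python) =====
-- def quick_mul(a, b):
--     base = 0
--     add = a
--     while b > 0:
--         if b & 1 == 1:
--             base += add
--         add += add
--         b >>= 1
--     return base
-- ===== SOURCE B (Python) =====
-- def quick_mul(a, b):
--     if b <= 0:
--         return 0
--     h = quick_mul(a, b >> 1)
--     return h + h + (a if b & 1 else 0)
-- ===== Notes on version B (the rewrite author's own statement) =====
-- stated objective: alternative
-- what changed: Replaced the iterative loop maintaining mutable base/add accumulators with a recursive divide-and-conquer: halve b, double the recursive result, add a when b is odd.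
import Mathlib
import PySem

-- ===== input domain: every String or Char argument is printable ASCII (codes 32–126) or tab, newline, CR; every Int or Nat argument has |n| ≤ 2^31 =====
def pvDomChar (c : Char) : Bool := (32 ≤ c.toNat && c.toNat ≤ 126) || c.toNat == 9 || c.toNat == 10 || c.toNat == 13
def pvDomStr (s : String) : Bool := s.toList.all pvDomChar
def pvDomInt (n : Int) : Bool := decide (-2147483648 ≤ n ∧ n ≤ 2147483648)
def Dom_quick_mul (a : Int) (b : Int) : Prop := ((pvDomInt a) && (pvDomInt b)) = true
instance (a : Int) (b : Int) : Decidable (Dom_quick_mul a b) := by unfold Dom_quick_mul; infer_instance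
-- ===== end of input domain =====

-- B replaces A's iterative loop with mutable base/add accumulators by a
-- recursive divide-and-conquer (halve b, double the recursive result); same cost.

-- 'b >> 1' is floor division by 2 (used by both ports' termination proofs)
theorem pv_shiftr1 (b : Int) : b >>> (1 : Int) = b / 2 := by
  have h1 : b >>> (1 : Int) = b >>> (1 : Nat) := by
    exact_mod_cast Int.shiftRight_natCast_right b 1
  rw [h1]
  have := Int.shiftRight_eq_div_pow b 1
  simpa using this

-- ===== PORT A =====
-- the while loop of A: state (base, add, b); Python's 'b & 1' is PySem.Int.band, 'b >>= 1' is '>>> 1'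
def quickMulLoop (base add b : Int) : Int :=
  if _h : 0 < b then
    quickMulLoop (if PySem.Int.band b 1 == 1 then base + add else base) (add + add) (b >>> 1)
  else base
termination_by b.toNat
decreasing_by
  have := pv_shiftr1 b
  omega

def quick_mul (a : Int) (b : Int) : Int :=
  quickMulLoop 0 a b

-- ===== PORT B =====
def quick_mul_alt (a : Int) (b : Int) : Int :=
  if _h : b ≤ 0 then 0
  else
    let hh := quick_mul_alt a (b >>> 1)
    hh + hh + (if PySem.Int.band b 1 ≠ 0 then a else 0)
termination_by b.toNat
decreasing_by
  have := pv_shiftr1 b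
  omega

-- ===== PRECONDITION & SPEC =====
def Spec_quick_mul (a : Int) (b : Int) (out : Int) : Prop := out = quick_mul_alt a b
instance (a : Int) (b : Int) (out : Int) : Decidable (Spec_quick_mul a b out) := by unfold Spec_quick_mul; infer_instance

-- ===== CLAIM (what is proved, stated in full; the proofs are below) =====
def Claim_equal_quick_mul : Prop := ∀ (a : Int) (b : Int), Dom_quick_mul a b → Spec_quick_mul a b (quick_mul a b)

-- ===== LEMMAS AND PROOFS =====

theorem pv_band1 (b : Int) : PySem.Int.band b 1 = PySem.Int.mod b 2 :=
  PySem.Int.band_one b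

theorem quickMulLoop_eq (base add b : Int) :
    quickMulLoop base add b = base + add * max b 0 := by
  rw [quickMulLoop.eq_def]
  split
  · rename_i hb
    rw [quickMulLoop_eq, pv_shiftr1, pv_band1, PySem.Int.mod_eq_emod_of_pos (by omega)]
    have h2 : b = 2 * (b / 2) + b % 2 := by omega
    have hmx : max b 0 = b := by omega
    have hmx2 : max (b / 2) 0 = b / 2 := by omega
    rw [hmx, hmx2]
    have hr : b % 2 = 0 ∨ b % 2 = 1 := by omega
    rcases hr with hr | hr <;> simp [hr] <;> linear_combination (-add) * h2 + (-add) * hr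
  · rename_i hb
    have : max b 0 = 0 := by omega
    simp [this]
termination_by b.toNat
decreasing_by
  have := pv_shiftr1 b
  omega

theorem quick_mul_alt_eq (a b : Int) :
    quick_mul_alt a b = a * max b 0 := by
  rw [quick_mul_alt.eq_def]
  split
  · rename_i hb
    have : max b 0 = 0 := by omega
    simp [this]
  · rename_i hb
    rw [quick_mul_alt_eq, pv_shiftr1, pv_band1, PySem.Int.mod_eq_emod_of_pos (by omega)]
    have h2 : b = 2 * (b / 2) + b % 2 := by omega
    have hmx : max b 0 = b := by omega
    have hmx2 : max (b / 2) 0 = b / 2 := by omega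
    rw [hmx, hmx2]
    have hr : b % 2 = 0 ∨ b % 2 = 1 := by omega
    rcases hr with hr | hr <;> simp [hr] <;> linear_combination (-a) * h2 + (-a) * hr
termination_by b.toNat
decreasing_by
  have := pv_shiftr1 b
  omega

-- ===== VERDICT (by name: the statement is the Claim_ definition above) =====
theorem quick_mul_spec : Claim_equal_quick_mul := by
  intro a b _
  unfold Spec_quick_mul quick_mul
  rw [quickMulLoop_eq, quick_mul_alt_eq]
  ring
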